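-- pv_equiv track=rewrite | github.com/zsun610/codingtest | Implementation/16935.py | sol5
-- ===== SOURCE A (Python) =====
-- def sol5(array,n,m):
--     #1 = array[0:n/2+1][0:m/2+1]
--     #2 = array[n/2+1:][0:m/2+1]
--     #3 = array[n / 2 + 1:][m / 2 + 1:]
--     #4 = array[0:n/2+1][m/2+1:]
--
--     # for랑 if문 합쳐서 표현 가능
--     tmp = [[0]*m for _ in range(n)]
--     for i in range(n):
--         for j in range(m):
--             if i < n/2:
--                 if j < m/2:  #1
--                     tmp[i][j] = array[i+n//2][j]
--                 else:  #2
--                     tmp[i][j] = array[i][j-m//2]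
--             else:
--                 if j >= m/2:  #3
--                     tmp[i][j] = array[i - n // 2][j]
--                 else:      #4
--                     tmp[i][j] = array[i][j + m // 2]
--     return tmp
-- ===== SOURCE B (Python) =====
-- def sol5(array, n, m):
--     nh, mh = n // 2, m // 2          # floor halves (the shift offsets)
--     nc, mc = n - nh, m - mh          # ceil halves (the split points, matching the float i < n/2 test)
--     top = [array[i + nh][:mc] + array[i][mc - mh:m - mh] for i in range(nc)]
--     bot = [array[i][mh:m] + array[i - nh][mc:m] for i in range(nc, n)]
--     return top + bot
-- ===== Notes on version B (the rewrite author's own statement) =====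
-- stated objective: simpler
-- what changed: Replaces the cell-by-cell nested index loop mutating a preallocated matrix with whole-quadrant row slicing: each output row is a concatenation of two slices of input rows, assembled by two comprehensions (top and bottom halves).
-- outside the precondition, e.g. on sol5([], 1, 0): A returns [[]], B raises IndexError; on sol5([[1, 2]], 1, -3): A returns [[]], B returns [[1]]
import Mathlib
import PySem

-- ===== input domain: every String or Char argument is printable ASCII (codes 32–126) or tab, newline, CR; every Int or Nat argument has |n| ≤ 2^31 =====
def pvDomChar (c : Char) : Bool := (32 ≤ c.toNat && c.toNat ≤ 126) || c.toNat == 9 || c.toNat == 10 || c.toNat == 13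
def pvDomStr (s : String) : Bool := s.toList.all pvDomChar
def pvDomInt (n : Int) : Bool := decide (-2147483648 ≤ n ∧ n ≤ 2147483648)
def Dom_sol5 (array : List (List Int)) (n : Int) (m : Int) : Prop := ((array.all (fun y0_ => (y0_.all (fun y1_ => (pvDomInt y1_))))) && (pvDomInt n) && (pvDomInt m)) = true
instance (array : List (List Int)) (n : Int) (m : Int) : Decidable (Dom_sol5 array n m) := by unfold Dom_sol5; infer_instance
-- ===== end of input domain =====

-- B rearranges the four quadrants by row slicing instead of A's cell-by-cell index loop; equal
-- return values are proved on Pre_sol5 (a full n×m block present); A mutates only its own fresh tmp.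

-- ===== PORT A =====
-- array[i] as a total function; exact on the in-range indices Pre_sol5 admits (IndexError = default, excluded by Pre_)
def pvRow (a : List (List Int)) (i : Int) : List Int := (PySem.List.pyGet? a i).getD []
-- array[i][j] as a total function; exact on the in-range indices Pre_sol5 admits
def pvGet2 (a : List (List Int)) (i j : Int) : Int := (PySem.List.pyGet? (pvRow a i) j).getD 0

-- the value assigned to tmp[i][j]; Python's float tests 'i < n/2' / 'j >= m/2' on ints are exactly '2*i < n' / '2*j ≥ m'
def sol5Val (array : List (List Int)) (n m i j : Int) : Int :=
  if 2 * i < n then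
    (if 2 * j < m then pvGet2 array (i + PySem.Int.floordiv n 2) j
     else pvGet2 array i (j - PySem.Int.floordiv m 2))
  else
    (if 2 * j ≥ m then pvGet2 array (i - PySem.Int.floordiv n 2) j
     else pvGet2 array i (j + PySem.Int.floordiv m 2))

def sol5 (array : List (List Int)) (n : Int) (m : Int) : List (List Int) :=
  let tmp := (PySem.List.pyRange 0 n).map (fun _ => PySem.List.pyRepeat [(0 : Int)] m)
  (PySem.List.pyRange 0 n).foldl (fun t i =>
    (PySem.List.pyRange 0 m).foldl (fun t j =>
      -- tmp[i][j] = …  (i, j come from range(n)/range(m) so they are nonnegative; .toNat is exact)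
      t.modify i.toNat (fun row => row.set j.toNat (sol5Val array n m i j))) t) tmp

-- ===== PORT B =====
def sol5_alt (array : List (List Int)) (n : Int) (m : Int) : List (List Int) :=
  let nh := PySem.Int.floordiv n 2
  let mh := PySem.Int.floordiv m 2
  let nc := n - nh
  let mc := m - mh
  let top := (PySem.List.pyRange 0 nc).map (fun i =>
    PySem.List.slice (pvRow array (i + nh)) none (some mc)
      ++ PySem.List.slice (pvRow array i) (some (mc - mh)) (some (m - mh)))
  let bot := (PySem.List.pyRange nc n).map (fun i =>
    PySem.List.slice (pvRow array i) (some mh) (some m)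
      ++ PySem.List.slice (pvRow array (i - nh)) (some mc) (some m))
  top ++ bot

-- ===== PRECONDITION & SPEC =====
-- Pre_ excludes inputs without a full n×m block (negative m, fewer than n rows, or one of the first n
-- rows shorter than m): there A usually raises IndexError, and where it still returns (m ≤ 0 with a
-- short array, or raggedness only in never-read cells) the value depends on accidents of A's indexing;
-- B's slicing naturally raises or returns its clamped value there.
def Pre_sol5 (array : List (List Int)) (n : Int) (m : Int) : Prop :=
  0 ≤ m ∧ n ≤ (array.length : Int) ∧ ∀ r ∈ array.take n.toNat, m ≤ (r.length : Int)
instance (array : List (List Int)) (n : Int) (m : Int) : Decidable (Pre_sol5 array n m) := by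
  unfold Pre_sol5; infer_instance

def pvWitness_sol5 : List (List Int) × Int × Int := ([[1, 2], [3, 4]], 2, 2)

def Spec_sol5 (array : List (List Int)) (n : Int) (m : Int) (out : List (List Int)) : Prop := out = sol5_alt array n m
instance (array : List (List Int)) (n : Int) (m : Int) (out : List (List Int)) : Decidable (Spec_sol5 array n m out) := by unfold Spec_sol5; infer_instance

-- ===== CLAIM (what is proved, stated in full; the proofs are below) =====
def Claim_equal_sol5 : Prop := ∀ (array : List (List Int)) (n : Int) (m : Int), Dom_sol5 array n m → Pre_sol5 array n m → Spec_sol5 array n m (sol5 array n m)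

-- ===== LEMMAS AND PROOFS =====

-- a drop/take slice over a long-enough list, read off elementwise
theorem pv_drop_take_eq_map (r : List Int) (a k : Nat) (h : a + k ≤ r.length) :
    (r.drop a).take k = (List.range k).map (fun j => r.getD (a + j) 0) := by
  apply List.ext_getElem
  · simp; omega
  · intro x h1 h2
    have hx : x < k := by simpa using h2
    have hax : a + x < r.length := by omega
    simp [List.getElem_take, List.getElem_drop, List.getD, List.getElem?_eq_getElem hax]

-- writing every position 0..K-1 of a list in order
theorem pv_setfold (v : Int → Int) :
    ∀ (K : Nat) (r : List Int), K ≤ r.length →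
      (PySem.List.pyRange 0 (K : Int)).foldl (fun r j => r.set j.toNat (v j)) r
        = (List.range K).map (fun k : Nat => v (k : Int)) ++ r.drop K := by
  intro K
  induction K with
  | zero => intro r h; simp [PySem.List.pyRange_one_eq_nil (by omega : (0:Int) ≤ 0)]
  | succ K ih =>
    intro r h
    have hcast : ((K + 1 : Nat) : Int) = (K : Int) + 1 := by push_cast; ring
    rw [hcast, PySem.List.pyRange_one_succ_right (by positivity), List.foldl_append,
        ih r (by omega)]
    have hK : K < r.length := by omega
    simp only [List.foldl_cons, List.foldl_nil, Int.toNat_natCast]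
    rw [List.set_append]
    simp only [List.length_map, List.length_range, lt_irrefl, Nat.sub_self]
    rw [List.drop_eq_getElem_cons hK, List.set_cons_zero]
    simp [List.range_succ]

-- a fold that only ever modifies index i commutes into one modify
theorem pv_foldl_modify (i : Nat) (f : Int → List Int → List Int) :
    ∀ (l : List Int) (t : List (List Int)),
      l.foldl (fun t j => t.modify i (fun row => f j row)) t
        = t.modify i (fun row => l.foldl (fun row j => f j row) row) := by
  intro l
  induction l with
  | nil => intro t; simp only [List.foldl_nil]; exact (List.modify_id i t).symm
  | cons x xs ih =>
    intro t
    rw [List.foldl_cons, ih]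
    apply List.ext_getElem
    · simp
    · intro y h1 h2
      simp only [List.getElem_modify]
      by_cases hy : i = y <;> simp [hy]

-- replacing row k by R k for every k = 0..K-1
theorem pv_modfold (M : Nat) (g : Int → List Int → List Int) (R : Int → List Int)
    (hg : ∀ i row, row.length = M → g i row = R i) :
    ∀ (K : Nat) (t : List (List Int)), K ≤ t.length → (∀ r ∈ t, r.length = M) →
      (PySem.List.pyRange 0 (K : Int)).foldl (fun t i => t.modify i.toNat (g i)) t
        = (List.range K).map (fun k : Nat => R (k : Int)) ++ t.drop K := by
  intro K
  induction K with
  | zero => intro t h ht; simp [PySem.List.pyRange_one_eq_nil (by omega : (0:Int) ≤ 0)]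
  | succ K ih =>
    intro t h ht
    have hcast : ((K + 1 : Nat) : Int) = (K : Int) + 1 := by push_cast; ring
    rw [hcast, PySem.List.pyRange_one_succ_right (by positivity), List.foldl_append,
        ih t (by omega) ht]
    have hK : K < t.length := by omega
    simp only [List.foldl_cons, List.foldl_nil, Int.toNat_natCast]
    rw [List.modify_eq_set]
    have hget : ((List.range K).map (fun k : Nat => R (k : Int)) ++ t.drop K)[K]? = some t[K] := by
      rw [List.getElem?_append_right (by simp)]
      simp [hK]
    rw [hget]
    simp only [Option.getD_some]
    rw [hg _ _ (ht _ (List.getElem_mem hK)), List.set_append]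
    simp only [List.length_map, List.length_range, lt_irrefl, Nat.sub_self]
    rw [List.drop_eq_getElem_cons hK, List.set_cons_zero]
    simp [List.range_succ]

-- A computes, row by row, the value table of sol5Val
theorem sol5_eq_map (array : List (List Int)) (n m : Int) (hm : 0 ≤ m) :
    sol5 array n m
      = (PySem.List.pyRange 0 n).map (fun i =>
          (PySem.List.pyRange 0 m).map (fun j => sol5Val array n m i j)) := by
  unfold sol5
  simp only [pv_foldl_modify]
  rcases le_or_gt n 0 with hn | hn
  · simp [PySem.List.pyRange_one_eq_nil hn]
  · obtain ⟨N, rfl⟩ : ∃ N : Nat, n = (N : Int) := ⟨n.toNat, (Int.toNat_of_nonneg hn.le).symm⟩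
    obtain ⟨M, rfl⟩ : ∃ M : Nat, m = (M : Int) := ⟨m.toNat, (Int.toNat_of_nonneg hm).symm⟩
    rw [pv_modfold M
      (g := fun i row => (PySem.List.pyRange 0 (M : Int)).foldl
          (fun row j => row.set j.toNat (sol5Val array (N : Int) (M : Int) i j)) row)
      (R := fun i => (PySem.List.pyRange 0 (M : Int)).map
          (fun j => sol5Val array (N : Int) (M : Int) i j))
      (hg := ?_) N _ (by simp [PySem.List.length_pyRange_one]) ?_]
    · rw [PySem.List.pyRange_one 0 (N : Int)]
      simp [List.map_map, Function.comp, List.drop_eq_nil_of_le]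
    · intro i row hrow
      dsimp only
      rw [pv_setfold (fun j => sol5Val array (N : Int) (M : Int) i j) M row (by omega)]
      rw [List.drop_eq_nil_of_le (by omega)]
      rw [PySem.List.pyRange_one 0 (M : Int)]
      simp [List.map_map, Function.comp]
    · intro r hr
      simp only [List.mem_map] at hr
      obtain ⟨_, _, rfl⟩ := hr
      simp [PySem.List.pyRepeat_singleton]

-- array[i][j] through pvRow, for a nonnegative column index
theorem pv_get2_eq (array : List (List Int)) (i j : Int) (hj : 0 ≤ j) :
    pvGet2 array i j = (pvRow array i).getD j.toNat 0 := by
  unfold pvGet2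
  rw [PySem.List.pyGet?_of_nonneg _ hj, List.getD_eq_getElem?_getD]

-- rows read by either program are the admitted rows: at least m entries long
theorem pv_row_len (array : List (List Int)) (n m : Int)
    (hlen : n ≤ (array.length : Int))
    (hrows : ∀ r ∈ array.take n.toNat, m ≤ (r.length : Int))
    (i : Int) (h0 : 0 ≤ i) (hi : i < n) : m ≤ ((pvRow array i).length : Int) := by
  have hiN : i.toNat < array.length := by omega
  have hrw : pvRow array i = array[i.toNat] := by
    unfold pvRow
    rw [PySem.List.pyGet?_of_nonneg _ h0, List.getElem?_eq_getElem hiN]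
    rfl
  rw [hrw]
  have h1 : i.toNat < (array.take n.toNat).length := by simp; omega
  have h2 := List.getElem_mem h1
  rw [List.getElem_take] at h2
  exact hrows _ h2

-- a bounded slice as a map over its index range
theorem pv_chunk (r : List Int) (a b : Int) (w : Nat → Int) (k : Nat)
    (h0 : 0 ≤ a) (hab : b - a = (k : Int)) (hb : b.toNat ≤ r.length)
    (hw : ∀ x : Nat, x < k → w x = r.getD (a.toNat + x) 0) :
    (List.range k).map w = PySem.List.slice r (some a) (some b) := by
  rw [PySem.List.slice_toNat r h0 (by omega)]
  have hk : b.toNat - a.toNat = k := by omega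
  rw [hk, pv_drop_take_eq_map r a.toNat k (by omega)]
  exact List.map_congr_left fun x hx => hw x (List.mem_range.mp hx)

-- a prefix slice as a map over its index range
theorem pv_chunk0 (r : List Int) (b : Int) (w : Nat → Int) (k : Nat)
    (hb0 : 0 ≤ b) (hbk : b = (k : Int)) (hb : b.toNat ≤ r.length)
    (hw : ∀ x : Nat, x < k → w x = r.getD x 0) :
    (List.range k).map w = PySem.List.slice r none (some b) := by
  rw [PySem.List.slice_to r hb0]
  rw [show r.take b.toNat = (r.drop 0).take b.toNat from by rw [List.drop_zero]]
  rw [show b.toNat = k from by omega, pv_drop_take_eq_map r 0 k (by omega)]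
  refine List.map_congr_left fun x hx => ?_
  rw [hw x (List.mem_range.mp hx), Nat.zero_add]

-- a row of the top half of the output
theorem pv_top_row (array : List (List Int)) (n m : Int) (hm : 0 ≤ m) (hn : 0 < n)
    (hlen : n ≤ (array.length : Int))
    (hrows : ∀ r ∈ array.take n.toNat, m ≤ (r.length : Int))
    (i : Int) (h0 : 0 ≤ i) (hi : i < n - PySem.Int.floordiv n 2) :
    (PySem.List.pyRange 0 m).map (fun j => sol5Val array n m i j)
      = PySem.List.slice (pvRow array (i + PySem.Int.floordiv n 2)) none
          (some (m - PySem.Int.floordiv m 2))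
        ++ PySem.List.slice (pvRow array i)
          (some (m - PySem.Int.floordiv m 2 - PySem.Int.floordiv m 2))
          (some (m - PySem.Int.floordiv m 2)) := by
  obtain ⟨hq1, hq2⟩ := (PySem.Int.floordiv_eq_iff_of_pos (by omega : (0:Int) < 2)).mp
    (rfl : PySem.Int.floordiv n 2 = PySem.Int.floordiv n 2)
  obtain ⟨hp1, hp2⟩ := (PySem.Int.floordiv_eq_iff_of_pos (by omega : (0:Int) < 2)).mp
    (rfl : PySem.Int.floordiv m 2 = PySem.Int.floordiv m 2)
  set q := PySem.Int.floordiv n 2 with hqdef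
  set p := PySem.Int.floordiv m 2 with hpdef
  rw [PySem.List.pyRange_one 0 m, List.map_map]
  rw [show (m - 0).toNat = (m - p).toNat + p.toNat from by omega, List.range_add,
    List.map_append]
  have hTL := pv_row_len array n m hlen hrows (i + q) (by omega) (by omega)
  have hTR := pv_row_len array n m hlen hrows i h0 (by omega)
  congr 1
  · refine pv_chunk0 _ _ _ _ (by omega) (by omega) (by omega) ?_
    intro x hx
    simp only [Function.comp_apply, zero_add, sol5Val, ← hqdef, ← hpdef]
    rw [if_pos (by omega), if_pos (by omega), pv_get2_eq _ _ _ (by omega)]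
    simp
  · rw [List.map_map]
    refine pv_chunk (pvRow array i) (m - p - p) (m - p) _ p.toNat
      (by omega) (by omega) (by omega) ?_
    intro x hx
    simp only [Function.comp_apply, zero_add, sol5Val, ← hqdef, ← hpdef]
    rw [if_pos (by omega : 2 * i < n), if_neg (by push_cast; omega),
      pv_get2_eq _ _ _ (by push_cast; omega)]
    congr 1
    omega

-- a row of the bottom half of the output
theorem pv_bot_row (array : List (List Int)) (n m : Int) (hm : 0 ≤ m) (hn : 0 < n)
    (hlen : n ≤ (array.length : Int))
    (hrows : ∀ r ∈ array.take n.toNat, m ≤ (r.length : Int))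
    (i : Int) (h0 : n - PySem.Int.floordiv n 2 ≤ i) (hi : i < n) :
    (PySem.List.pyRange 0 m).map (fun j => sol5Val array n m i j)
      = PySem.List.slice (pvRow array i) (some (PySem.Int.floordiv m 2)) (some m)
        ++ PySem.List.slice (pvRow array (i - PySem.Int.floordiv n 2))
          (some (m - PySem.Int.floordiv m 2)) (some m) := by
  obtain ⟨hq1, hq2⟩ := (PySem.Int.floordiv_eq_iff_of_pos (by omega : (0:Int) < 2)).mp
    (rfl : PySem.Int.floordiv n 2 = PySem.Int.floordiv n 2)
  obtain ⟨hp1, hp2⟩ := (PySem.Int.floordiv_eq_iff_of_pos (by omega : (0:Int) < 2)).mp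
    (rfl : PySem.Int.floordiv m 2 = PySem.Int.floordiv m 2)
  set q := PySem.Int.floordiv n 2 with hqdef
  set p := PySem.Int.floordiv m 2 with hpdef
  rw [PySem.List.pyRange_one 0 m, List.map_map]
  rw [show (m - 0).toNat = (m - p).toNat + p.toNat from by omega, List.range_add,
    List.map_append]
  have hBL := pv_row_len array n m hlen hrows i (by omega) hi
  have hBR := pv_row_len array n m hlen hrows (i - q) (by omega) (by omega)
  congr 1
  · refine pv_chunk (pvRow array i) p m _ (m - p).toNat
      (by omega) (by omega) (by omega) ?_
    intro x hx
    simp only [Function.comp_apply, zero_add, sol5Val, ← hqdef, ← hpdef]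
    rw [if_neg (by omega : ¬ 2 * i < n), if_neg (by omega),
      pv_get2_eq _ _ _ (by omega)]
    congr 1
    omega
  · rw [List.map_map]
    refine pv_chunk (pvRow array (i - q)) (m - p) m _ p.toNat
      (by omega) (by omega) (by omega) ?_
    intro x hx
    simp only [Function.comp_apply, zero_add, sol5Val, ← hqdef, ← hpdef]
    rw [if_neg (by omega : ¬ 2 * i < n), if_pos (by push_cast; omega),
      pv_get2_eq _ _ _ (by push_cast; omega)]
    congr 1

-- ===== VERDICT (by name: the statement is the Claim_ definition above) =====
theorem sol5_spec : Claim_equal_sol5 := by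
  unfold Claim_equal_sol5
  intro array n m _hd hpre
  obtain ⟨hm, hlen, hrows⟩ := hpre
  unfold Spec_sol5
  rw [sol5_eq_map array n m hm]
  obtain ⟨hq1, hq2⟩ := (PySem.Int.floordiv_eq_iff_of_pos (by omega : (0:Int) < 2)).mp
    (rfl : PySem.Int.floordiv n 2 = PySem.Int.floordiv n 2)
  simp only [sol5_alt]
  rcases le_or_gt n 0 with hn | hn
  · rw [PySem.List.pyRange_one_eq_nil hn,
      PySem.List.pyRange_one_eq_nil (by omega : n - PySem.Int.floordiv n 2 ≤ 0),
      PySem.List.pyRange_one_eq_nil (by omega : n ≤ n - PySem.Int.floordiv n 2)]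
    simp
  · rw [PySem.List.pyRange_one_append 0 (n - PySem.Int.floordiv n 2) n (by omega) (by omega),
      List.map_append]
    congr 1
    · refine List.map_congr_left fun i hi => ?_
      rw [PySem.List.mem_pyRange_one] at hi
      exact pv_top_row array n m hm hn hlen hrows i hi.1 hi.2
    · refine List.map_congr_left fun i hi => ?_
      rw [PySem.List.mem_pyRange_one] at hi
      exact pv_bot_row array n m hm hn hlen hrows i hi.1 hi.2
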